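-- pv_equiv track=rewrite | github.com/JBreitenbr/spotidjango | 01-2026.py | is_sorted
-- ===== SOURCE A (Python) =====
-- def is_sorted(arr):
--     c=[]
--     for i in range(1,len(arr)):
--         c.append(arr[i]-arr[i-1])
--     flt1=[]
--     flt2=[]
--     for i in range(len(c)):
--         if c[i]>0:
--             flt1.append(c[i])
--         if c[i]<0:
--             flt2.append(c[i])
--     if len(flt1)==len(c):
--         return "Ascending"
--     elif len(flt2)==len(c):
--         return "Descending"
--     else:
--         return "Not sorted"
-- ===== SOURCE B (Python) =====
-- def is_sorted(arr):
--     all_positive = True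
--     all_negative = True
--     for i in range(1, len(arr)):
--         if not (arr[i] > arr[i-1]):
--             all_positive = False
--         if not (arr[i] < arr[i-1]):
--             all_negative = False
--     if all_positive:
--         return "Ascending"
--     elif all_negative:
--         return "Descending"
--     else:
--         return "Not sorted"
-- ===== Notes on version B (the rewrite author's own statement) =====
-- stated objective: simpler
-- what changed: Replaced the difference array and the two partition lists (compared by length) with a single pass over adjacent pairs maintaining two boolean flags, building no intermediate lists.
import Mathlib
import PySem

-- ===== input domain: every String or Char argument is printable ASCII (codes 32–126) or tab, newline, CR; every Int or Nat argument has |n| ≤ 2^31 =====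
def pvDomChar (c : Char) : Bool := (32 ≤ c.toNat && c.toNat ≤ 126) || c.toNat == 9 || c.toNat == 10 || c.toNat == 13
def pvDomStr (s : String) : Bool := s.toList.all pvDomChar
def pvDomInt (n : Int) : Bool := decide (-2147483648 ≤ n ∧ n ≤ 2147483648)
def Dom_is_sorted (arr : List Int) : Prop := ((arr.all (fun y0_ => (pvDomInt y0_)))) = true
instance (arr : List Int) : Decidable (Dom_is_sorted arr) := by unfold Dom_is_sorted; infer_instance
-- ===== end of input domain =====

-- B replaces A's difference array and two partition lists with one pass over
-- adjacent pairs maintaining two boolean flags (objective: simpler, O(1) extra space).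


-- ===== PORT A =====
def is_sorted (arr : List Int) : String :=
  -- c = []; for i in range(1, len(arr)): c.append(arr[i] - arr[i-1])
  let c : List Int :=
    (PySem.List.pyRange 1 (arr.length : Int) 1).foldl
      (fun c i => c ++ [PySem.List.pyGetD arr i 0 - PySem.List.pyGetD arr (i - 1) 0]) []
  -- flt1 = []; flt2 = []; for i in range(len(c)): two independent ifs
  let p : List Int × List Int :=
    (PySem.List.pyRange 0 (c.length : Int) 1).foldl
      (fun p i =>
        let x := PySem.List.pyGetD c i 0
        (if x > 0 then p.1 ++ [x] else p.1,
         if x < 0 then p.2 ++ [x] else p.2))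
      ([], [])
  if p.1.length = c.length then "Ascending"
  else if p.2.length = c.length then "Descending"
  else "Not sorted"

-- ===== PORT B =====
def is_sorted_alt (arr : List Int) : String :=
  -- all_positive = True; all_negative = True; one pass over adjacent pairs
  let fl : Bool × Bool :=
    (PySem.List.pyRange 1 (arr.length : Int) 1).foldl
      (fun fl i =>
        ((if ¬ (PySem.List.pyGetD arr i 0 > PySem.List.pyGetD arr (i - 1) 0) then false else fl.1),
         (if ¬ (PySem.List.pyGetD arr i 0 < PySem.List.pyGetD arr (i - 1) 0) then false else fl.2)))
      (true, true)
  if fl.1 then "Ascending"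
  else if fl.2 then "Descending"
  else "Not sorted"

-- ===== PRECONDITION & SPEC =====
def Spec_is_sorted (arr : List Int) (out : String) : Prop := out = is_sorted_alt arr
instance (arr : List Int) (out : String) : Decidable (Spec_is_sorted arr out) := by unfold Spec_is_sorted; infer_instance

-- ===== CLAIM (what is proved, stated in full; the proofs are below) =====
def Claim_equal_is_sorted : Prop := ∀ (arr : List Int), Dom_is_sorted arr → Spec_is_sorted arr (is_sorted arr)

-- ===== LEMMAS AND PROOFS =====

-- A's partition loop over a list of values appends the positive / negative filters.
theorem pvA_partition (d : List Int) (f1 f2 : List Int) :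
    d.foldl
      (fun (p : List Int × List Int) x =>
        (if x > 0 then p.1 ++ [x] else p.1,
         if x < 0 then p.2 ++ [x] else p.2))
      (f1, f2)
    = (f1 ++ d.filter (fun x => decide (x > 0)), f2 ++ d.filter (fun x => decide (x < 0))) := by
  induction d generalizing f1 f2 with
  | nil => simp
  | cons x t ih =>
      simp only [List.foldl_cons, List.filter_cons]
      by_cases h1 : x > 0 <;> by_cases h2 : x < 0 <;>
        simp [h1, h2, ih, List.append_assoc]

-- B's flag loop computes the conjunction of the two pointwise tests.
theorem pvB_flags (l : List Int) (q r : Int → Prop) [DecidablePred q] [DecidablePred r]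
    (b1 b2 : Bool) :
    l.foldl
      (fun (fl : Bool × Bool) i =>
        ((if ¬ q i then false else fl.1), (if ¬ r i then false else fl.2)))
      (b1, b2)
    = (b1 && l.all (fun i => decide (q i)), b2 && l.all (fun i => decide (r i))) := by
  induction l generalizing b1 b2 with
  | nil => simp
  | cons x t ih =>
      rw [List.foldl_cons, ih]
      by_cases hq : q x <;> by_cases hr : r x <;>
        simp [hq, hr]

theorem is_sorted_spec : Claim_equal_is_sorted := by
  intro arr _
  unfold Spec_is_sorted
  simp only [is_sorted, is_sorted_alt]
  rw [PySem.List.foldl_append_singleton_eq_map, List.nil_append]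
  set d : List Int := (PySem.List.pyRange 1 (arr.length : Int) 1).map
      (fun i => PySem.List.pyGetD arr i 0 - PySem.List.pyGetD arr (i - 1) 0) with hd
  rw [PySem.List.foldl_pyRange_zero_pyGetD' d 0
        (fun (p : List Int × List Int) x =>
          (if x > 0 then p.1 ++ [x] else p.1, if x < 0 then p.2 ++ [x] else p.2)) ([], []),
      pvA_partition, List.nil_append, List.nil_append, pvB_flags]
  have e1 : (d.filter (fun x => decide (x > 0))).length = d.length ↔
      (PySem.List.pyRange 1 (arr.length : Int) 1).all
        (fun i => decide (PySem.List.pyGetD arr i 0 > PySem.List.pyGetD arr (i - 1) 0)) = true := by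
    rw [List.length_filter_eq_length_iff, hd]
    simp only [List.mem_map, List.all_eq_true, decide_eq_true_eq, forall_exists_index, and_imp]
    constructor
    · intro h i hi; have := h _ i hi rfl; omega
    · rintro h x i hi rfl; have := h i hi; omega
  have e2 : (d.filter (fun x => decide (x < 0))).length = d.length ↔
      (PySem.List.pyRange 1 (arr.length : Int) 1).all
        (fun i => decide (PySem.List.pyGetD arr i 0 < PySem.List.pyGetD arr (i - 1) 0)) = true := by
    rw [List.length_filter_eq_length_iff, hd]
    simp only [List.mem_map, List.all_eq_true, decide_eq_true_eq, forall_exists_index, and_imp]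
    constructor
    · intro h i hi; have := h _ i hi rfl; omega
    · rintro h x i hi rfl; have := h i hi; omega
  simp only [Bool.true_and]
  split_ifs with h1 h2 h3 h4 h5 h6 h7 <;>
    first
    | rfl
    | (exact absurd (e1.mp h1) (by simp_all))
    | (exact absurd (e1.mpr (by simp_all)) h1)
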